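-- pv_equiv track=rewrite | github.com/myonathanlinkedin/ai_sprint_estimator | src/baseline.py | heuristic_estimate
-- ===== SOURCE A (Python) =====
-- def heuristic_estimate(story: str) -> int:
--     """
--     A simple keyword-based heuristic for story point estimation.
--     This is a baseline method that can be used for comparison.
--     """
--     # Define complexity indicators
--     low_complexity_indicators = ["view", "read", "list", "display", "browse"]
--     medium_complexity_indicators = ["update", "create", "form", "auth",
--         "discount", "assign"]
--     high_complexity_indicators = ["integrate", "export", "import", "payment",
--         "real time", "dashboard", "analytics",
--         "notifications"]
--
--     story_lower = story.lower()
--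
--     # Count complexity indicators
--     low_count = sum(1 for indicator in low_complexity_indicators
--                     if indicator in story_lower)
--     medium_count = sum(1 for indicator in medium_complexity_indicators
--                        if indicator in story_lower)
--     high_count = sum(1 for indicator in high_complexity_indicators
--                      if indicator in story_lower)
--
--     # Determine score based on complexity indicators
--     if high_count > 0:
--         return min(10, 6 + high_count)  # High complexity: 6-10 points
--     elif medium_count > 0:
--         return min(8, 3 + medium_count)  # Medium complexity: 3-8 points
--     elif low_count > 0:
--         return min(5, 1 + low_count)  # Low complexity: 1-5 points
--     else:
--         return 3  # Default for unrecognized patterns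
-- ===== SOURCE B (Python) =====
-- # Single streaming pass: flat keyword -> (tier, base, cap) map, running best-tier/count accumulator.
-- _KEYWORDS = {
--     "view": (1, 1, 5), "read": (1, 1, 5), "list": (1, 1, 5),
--     "display": (1, 1, 5), "browse": (1, 1, 5),
--     "update": (2, 3, 8), "create": (2, 3, 8), "form": (2, 3, 8),
--     "auth": (2, 3, 8), "discount": (2, 3, 8), "assign": (2, 3, 8),
--     "integrate": (3, 6, 10), "export": (3, 6, 10), "import": (3, 6, 10),
--     "payment": (3, 6, 10), "real time": (3, 6, 10), "dashboard": (3, 6, 10),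
--     "analytics": (3, 6, 10), "notifications": (3, 6, 10),
-- }
--
--
-- def heuristic_estimate(story: str) -> int:
--     s = story.lower()
--     best = None  # (tier, base, cap) of the strongest tier seen so far
--     count = 0    # number of matched keywords of that tier
--     for kw, info in _KEYWORDS.items():
--         if kw in s:
--             if best is None or info[0] > best[0]:
--                 best, count = info, 1
--             elif info[0] == best[0]:
--                 count += 1
--     if best is None:
--         return 3
--     return min(best[2], best[1] + count)
-- ===== Notes on version B (the rewrite author's own statement) =====
-- stated objective: alternative
-- what changed: Replaces A's three separate per-tier counting passes followed by a branch chain with one streaming pass over a flat keyword->(tier,base,cap) map that maintains a running maximum-tier record and a count of matches in that tier, computing the score from the accumulator at the end.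
import Mathlib
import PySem

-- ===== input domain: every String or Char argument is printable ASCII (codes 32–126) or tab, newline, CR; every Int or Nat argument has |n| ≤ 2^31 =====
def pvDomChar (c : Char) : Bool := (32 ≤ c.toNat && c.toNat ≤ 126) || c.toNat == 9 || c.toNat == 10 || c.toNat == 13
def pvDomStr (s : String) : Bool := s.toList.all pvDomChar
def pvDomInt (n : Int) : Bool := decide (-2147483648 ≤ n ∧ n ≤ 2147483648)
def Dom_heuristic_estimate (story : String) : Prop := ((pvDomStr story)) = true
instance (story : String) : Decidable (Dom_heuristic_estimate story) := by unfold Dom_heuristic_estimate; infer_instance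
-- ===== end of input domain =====

-- B replaces A's three per-tier counting passes and branch chain by ONE streaming pass
-- over a flat keyword->(tier,base,cap) map with a running best-tier/count accumulator
-- (alternative decomposition, same keywords and constants).

-- ===== PORT A =====
def heuristic_estimate (story : String) : Int :=
  let low_complexity_indicators : List String := ["view", "read", "list", "display", "browse"]
  let medium_complexity_indicators : List String := ["update", "create", "form", "auth", "discount", "assign"]
  let high_complexity_indicators : List String := ["integrate", "export", "import", "payment", "real time", "dashboard", "analytics", "notifications"]
  let story_lower := PySem.Str.lower story
  let low_count : Int := low_complexity_indicators.foldl
    (fun acc indicator => if PySem.Str.isIn indicator story_lower then acc + 1 else acc) 0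
  let medium_count : Int := medium_complexity_indicators.foldl
    (fun acc indicator => if PySem.Str.isIn indicator story_lower then acc + 1 else acc) 0
  let high_count : Int := high_complexity_indicators.foldl
    (fun acc indicator => if PySem.Str.isIn indicator story_lower then acc + 1 else acc) 0
  if high_count > 0 then min 10 (6 + high_count)
  else if medium_count > 0 then min 8 (3 + medium_count)
  else if low_count > 0 then min 5 (1 + low_count)
  else 3

-- ===== PORT B =====
-- the flat keyword -> (tier, base, cap) dict, in Python insertion order
def pvKeywords : List (String × (Int × Int × Int)) :=
  [("view", (1, 1, 5)), ("read", (1, 1, 5)), ("list", (1, 1, 5)),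
   ("display", (1, 1, 5)), ("browse", (1, 1, 5)),
   ("update", (2, 3, 8)), ("create", (2, 3, 8)), ("form", (2, 3, 8)),
   ("auth", (2, 3, 8)), ("discount", (2, 3, 8)), ("assign", (2, 3, 8)),
   ("integrate", (3, 6, 10)), ("export", (3, 6, 10)), ("import", (3, 6, 10)),
   ("payment", (3, 6, 10)), ("real time", (3, 6, 10)), ("dashboard", (3, 6, 10)),
   ("analytics", (3, 6, 10)), ("notifications", (3, 6, 10))]

-- one iteration of the 'for kw, info in _KEYWORDS.items()' loop body
def pvStep (s : String) (st : Option (Int × Int × Int) × Int)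
    (kv : String × (Int × Int × Int)) : Option (Int × Int × Int) × Int :=
  if PySem.Str.isIn kv.1 s then
    match st.1 with
    | none => (some kv.2, 1)
    | some b =>
        if kv.2.1 > b.1 then (some kv.2, 1)
        else if kv.2.1 = b.1 then (some b, st.2 + 1)
        else (some b, st.2)
  else st

def heuristic_estimate_alt (story : String) : Int :=
  let s := PySem.Str.lower story
  let r := pvKeywords.foldl (pvStep s) (none, 0)
  match r.1 with
  | none => 3
  | some b => min b.2.2 (b.2.1 + r.2)

-- ===== PRECONDITION & SPEC =====
def Spec_heuristic_estimate (story : String) (out : Int) : Prop := out = heuristic_estimate_alt story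
instance (story : String) (out : Int) : Decidable (Spec_heuristic_estimate story out) := by unfold Spec_heuristic_estimate; infer_instance

-- ===== CLAIM =====
def Claim_equal_heuristic_estimate : Prop := ∀ (story : String), Dom_heuristic_estimate story → Spec_heuristic_estimate story (heuristic_estimate story)

-- ===== LEMMAS AND PROOFS =====

-- closed form of folding pvStep over one tier segment (all keywords share (t,b,cap))
def pvSegRes (t b cap : Int) (n : Int) (st : Option (Int × Int × Int) × Int) :
    Option (Int × Int × Int) × Int :=
  match st.1 with
  | none => if n = 0 then st else (some (t, b, cap), n)
  | some bb =>
      if t > bb.1 then (if n = 0 then st else (some (t, b, cap), n))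
      else if t = bb.1 then (some bb, st.2 + n)
      else st

theorem pvStep_in (s kw : String) (info : Int × Int × Int) (b1 : Int × Int × Int) (c : Int)
    (hk : PySem.Str.isIn kw s = true) :
    pvStep s (some b1, c) (kw, info)
      = if info.1 > b1.1 then (some info, 1)
        else if info.1 = b1.1 then (some b1, c + 1) else (some b1, c) := by
  simp only [pvStep]
  rw [if_pos hk]

theorem pvStep_in_none (s kw : String) (info : Int × Int × Int) (c : Int)
    (hk : PySem.Str.isIn kw s = true) :
    pvStep s (none, c) (kw, info) = (some info, 1) := by
  simp only [pvStep]
  rw [if_pos hk]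

theorem pvStep_out (s kw : String) (info : Int × Int × Int)
    (st : Option (Int × Int × Int) × Int)
    (hk : ¬ PySem.Str.isIn kw s = true) :
    pvStep s st (kw, info) = st := by
  simp only [pvStep]
  rw [if_neg hk]

theorem pvSeg (s : String) (t b cap : Int) (ks : List String)
    (st : Option (Int × Int × Int) × Int) :
    (ks.map (fun k => (k, (t, b, cap)))).foldl (pvStep s) st
      = pvSegRes t b cap ((ks.countP (fun k => PySem.Str.isIn k s) : Nat) : Int) st := by
  induction ks generalizing st with
  | nil =>
    rcases st with ⟨b1 | b1, c⟩ <;> simp [pvSegRes] <;> split_ifs <;> simp_all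
  | cons k ks ih =>
    simp only [List.map, List.foldl, List.countP_cons]
    by_cases hk : PySem.Str.isIn k s
    · rcases st with ⟨b1 | b1, c⟩
      · rw [pvStep_in_none s k _ c hk, ih]
        simp [pvSegRes, hk]
        split_ifs <;> simp_all <;> push_cast <;> omega
      · rw [pvStep_in s k _ b1 c hk]
        by_cases h1 : t > b1.1
        · rw [if_pos h1, ih]
          simp [pvSegRes, hk, h1]
          split_ifs <;> simp_all <;> push_cast <;> omega
        · by_cases h2 : t = b1.1
          · rw [if_neg h1, if_pos h2, ih]
            simp only [pvSegRes, h1, if_neg h1, if_pos h2, hk, if_true]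
            simp [hk]
            push_cast
            omega
          · rw [if_neg h1, if_neg h2, ih]
            simp [pvSegRes, hk, h1, h2]
    · rw [Bool.not_eq_true] at hk
      rw [pvStep_out s k _ st (by simpa using hk), ih]
      simp only [hk, Bool.false_eq_true, if_false, Nat.add_zero]

theorem pvKeywords_split :
    pvKeywords =
      ((["view", "read", "list", "display", "browse"].map (fun k => (k, ((1:Int), (1:Int), (5:Int)))))
        ++ (["update", "create", "form", "auth", "discount", "assign"].map (fun k => (k, ((2:Int), (3:Int), (8:Int)))))
        ++ (["integrate", "export", "import", "payment", "real time", "dashboard", "analytics", "notifications"].map (fun k => (k, ((3:Int), (6:Int), (10:Int)))))) := rfl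

-- ===== VERDICT =====
theorem heuristic_estimate_spec : Claim_equal_heuristic_estimate := by
  intro story _
  unfold Spec_heuristic_estimate heuristic_estimate heuristic_estimate_alt
  rw [pvKeywords_split]
  simp only [List.foldl_append, pvSeg, PySem.List.foldl_if_add_one, zero_add]
  generalize List.countP (fun k => PySem.Str.isIn k (PySem.Str.lower story))
      ["view", "read", "list", "display", "browse"] = Ln
  generalize List.countP (fun k => PySem.Str.isIn k (PySem.Str.lower story))
      ["update", "create", "form", "auth", "discount", "assign"] = Mn
  generalize List.countP (fun k => PySem.Str.isIn k (PySem.Str.lower story))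
      ["integrate", "export", "import", "payment", "real time", "dashboard", "analytics", "notifications"] = Hn
  by_cases hLz : Ln = 0 <;> by_cases hMz : Mn = 0 <;> by_cases hHz : Hn = 0 <;>
    simp [pvSegRes, hLz, hMz, hHz, Nat.pos_iff_ne_zero] <;> split_ifs <;> simp_all <;> omega
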